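-- pv_equiv track=rewrite | github.com/Bykov-Mikhail/Python_Basic | Module20/02_universal_prog_2/main.py | crypto
-- ===== SOURCE A (Python) =====
-- import math
--
-- def crypto(data):
--     result = []
--     if isinstance(data, dict):
--         data = data.values()
--     for index, elem in enumerate(data):
--         if check_past_num(index):
--             result.append(elem)
--     return result
--
-- def check_past_num(index_element):
--     if index_element < 2:
--         return False
--     if index_element == 2:
--         return True
--     if index_element % 2 == 0:
--         return False
--     for num in range(3, int(math.sqrt(index_element)) + 1, 2):
--         if index_element % num == 0:
--             return False
--     return True
-- ===== SOURCE B (Python) =====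
-- import math
--
-- def crypto(data):
--     if isinstance(data, dict):
--         data = data.values()
--     data = list(data)
--     n = len(data)
--     composites = build_composites(n)
--     return [x for i, x in enumerate(data) if i >= 2 and i not in composites]
--
-- def build_composites(n):
--     composites = set()
--     for p in range(2, math.isqrt(n) + 1):
--         if p not in composites:
--             for q in range(p * p, n, p):
--                 composites.add(q)
--     return composites
-- ===== Notes on version B (the rewrite author's own statement) =====
-- stated objective: faster
-- what changed: A runs trial division up to sqrt(i) for every index i; B precomputes the set of composite indices once with a Sieve of Eratosthenes and then filters the enumerated list in a single pass.
import Mathlib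
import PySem

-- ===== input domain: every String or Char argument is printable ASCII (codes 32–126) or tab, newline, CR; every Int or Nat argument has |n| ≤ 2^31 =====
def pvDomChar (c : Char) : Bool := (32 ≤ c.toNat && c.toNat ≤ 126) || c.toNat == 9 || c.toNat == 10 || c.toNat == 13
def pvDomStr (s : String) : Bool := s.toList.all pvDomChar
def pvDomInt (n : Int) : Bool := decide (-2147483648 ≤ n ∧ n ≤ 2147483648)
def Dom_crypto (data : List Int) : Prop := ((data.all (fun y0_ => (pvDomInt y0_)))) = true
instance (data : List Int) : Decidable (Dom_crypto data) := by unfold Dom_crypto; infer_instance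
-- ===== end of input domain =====

-- B replaces A's per-index trial division by one Sieve of Eratosthenes over the index range plus a single
-- filtering pass (objective: faster — asymptotic, O(n log log n) sieve vs O(n·√n) trial division).


-- ===== PORT A =====
-- check_past_num; the for-loop with early 'return False' is the .any over the same range.
-- int(math.sqrt(i)) is exact (= math.isqrt(i)) for every index reachable here (list indices, far below 2^52),
-- so it is ported as Nat.sqrt.
def checkPastNum (i : Int) : Bool :=
  if i < 2 then false
  else if i = 2 then true
  else if PySem.Int.mod i 2 = 0 then false
  else if (PySem.List.pyRange 3 ((Nat.sqrt i.toNat : Int) + 1) 2).any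
            (fun num => PySem.Int.mod i num = 0) then false
  else true

-- 'data' is typed List Int here, so the isinstance(data, dict) branch is never taken.
def crypto (data : List Int) : List Int :=
  (PySem.List.enumerate data 0).foldl
    (fun result ix => if checkPastNum ix.1 then result ++ [ix.2] else result) []

-- ===== PORT B =====
-- inner 'for q in range(p*p, n, p): composites.add(q)' of build_composites
def markMultiples (n : Int) (composites : PySem.Set Int) (p : Int) : PySem.Set Int :=
  if composites.contains p then composites
  else (PySem.List.pyRange (p * p) n p).foldl PySem.Set.add composites

-- build_composites(n): sieve of Eratosthenes over range(2, isqrt(n)+1)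
def buildComposites (n : Int) : PySem.Set Int :=
  (PySem.List.pyRange 2 ((Nat.sqrt n.toNat : Int) + 1) 1).foldl (markMultiples n) PySem.Set.empty

def crypto_alt (data : List Int) : List Int :=
  let n : Int := (data.length : Int)
  let composites := buildComposites n
  (PySem.List.enumerate data 0).foldl
    (fun acc ix => if decide (2 ≤ ix.1) && !(composites.contains ix.1) then acc ++ [ix.2] else acc) []

-- ===== PRECONDITION & SPEC =====
def Spec_crypto (data : List Int) (out : List Int) : Prop := out = crypto_alt data
instance (data : List Int) (out : List Int) : Decidable (Spec_crypto data out) := by unfold Spec_crypto; infer_instance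

-- ===== CLAIM (what is proved, stated in full; the proofs are below) =====
def Claim_equal_crypto : Prop := ∀ (data : List Int), Dom_crypto data → Spec_crypto data (crypto data)

-- ===== LEMMAS AND PROOFS =====

-- a "small-factor witness": what every element the sieve marks satisfies
def SieveWit (y : Int) : Prop := ∃ p : Int, 2 ≤ p ∧ p ∣ y ∧ p * p ≤ y

lemma not_prime_of_sieveWit {y : Int} (h : SieveWit y) : ¬ Nat.Prime y.toNat := by
  obtain ⟨p, hp2, hdvd, hsq⟩ := h
  intro hpr
  have hy4 : (4 : Int) ≤ y := le_trans (by nlinarith) hsq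
  have hpy : p < y := by nlinarith
  have hdn : p.toNat ∣ y.toNat := by
    rcases hdvd with ⟨c, hc⟩
    have hc0 : 0 ≤ c := by nlinarith
    refine ⟨c.toNat, ?_⟩
    have : y = (p.toNat : Int) * (c.toNat : Int) := by
      rw [Int.toNat_of_nonneg (by omega), Int.toNat_of_nonneg hc0]; exact hc
    omega
  rcases (Nat.Prime.eq_one_or_self_of_dvd hpr _ hdn) with h1 | h1 <;> omega

lemma sieveWit_of_mem_range {n p y : Int} (hp : 2 ≤ p)
    (hy : y ∈ PySem.List.pyRange (p * p) n p) : SieveWit y := by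
  rw [PySem.List.mem_pyRange_iff_of_pos (by omega)] at hy
  obtain ⟨h1, _, c, hc⟩ := hy
  exact ⟨p, hp, ⟨p + c, by linarith [hc]⟩, h1⟩

lemma mem_markMultiples (n : Int) (c : PySem.Set Int) (p y : Int) :
    y ∈ markMultiples n c p ↔ y ∈ c ∨ (p ∉ c ∧ y ∈ PySem.List.pyRange (p * p) n p) := by
  unfold markMultiples
  by_cases hp : p ∈ c
  · rw [if_pos ((PySem.Set.contains_iff c p).mpr hp)]
    simp [hp]
  · rw [if_neg (by simpa using (fun h => hp ((PySem.Set.contains_iff c p).mp h)))]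
    have := PySem.Set.mem_foldl_add (PySem.List.pyRange (p * p) n p) (fun x => x) c y
    constructor
    · intro h
      rcases (this.mp h) with h | ⟨b, hb, rfl⟩
      · exact Or.inl h
      · exact Or.inr ⟨hp, hb⟩
    · rintro (h | ⟨-, h⟩)
      · exact this.mpr (Or.inl h)
      · exact this.mpr (Or.inr ⟨y, h, rfl⟩)

lemma sieve_fold_sound (n : Int) :
    ∀ (l : List Int) (c : PySem.Set Int), (∀ p ∈ l, 2 ≤ p) → (∀ y ∈ c, SieveWit y) →
      ∀ y ∈ l.foldl (markMultiples n) c, SieveWit y := by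
  intro l
  induction l with
  | nil => intro c _ hc y hy; exact hc y hy
  | cons p l ih =>
    intro c hl hc y hy
    refine ih (markMultiples n c p) (fun q hq => hl q (List.mem_cons_of_mem _ hq)) ?_ y hy
    intro z hz
    rcases (mem_markMultiples n c p z).mp hz with h | ⟨-, h⟩
    · exact hc z h
    · exact sieveWit_of_mem_range (hl p (List.mem_cons_self)) h

lemma sieve_fold_mono (n : Int) :
    ∀ (l : List Int) (c : PySem.Set Int) (y : Int), y ∈ c → y ∈ l.foldl (markMultiples n) c := by
  intro l
  induction l with
  | nil => intro c y hy; exact hy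
  | cons p l ih =>
    intro c y hy
    exact ih _ y ((mem_markMultiples n c p y).mpr (Or.inl hy))

lemma sieve_fold_complete (n : Int) :
    ∀ (l : List Int) (c : PySem.Set Int) (q k : Int), (∀ p ∈ l, 2 ≤ p) → (∀ y ∈ c, SieveWit y) →
      q ∈ l → Nat.Prime q.toNat → k ∈ PySem.List.pyRange (q * q) n q →
      k ∈ l.foldl (markMultiples n) c := by
  intro l
  induction l with
  | nil => intro c q k _ _ hq; exact absurd hq (List.not_mem_nil)
  | cons p l ih =>
    intro c q k hl hc hq hqp hk
    rcases List.mem_cons.mp hq with rfl | hq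
    · refine sieve_fold_mono n l (markMultiples n c q) k ?_
      refine (mem_markMultiples n c q k).mpr (Or.inr ⟨?_, hk⟩)
      intro hqc
      exact not_prime_of_sieveWit (hc q hqc) hqp
    · refine ih (markMultiples n c p) q k (fun r hr => hl r (List.mem_cons_of_mem _ hr)) ?_ hq hqp hk
      intro z hz
      rcases (mem_markMultiples n c p z).mp hz with h | ⟨-, h⟩
      · exact hc z h
      · exact sieveWit_of_mem_range (hl p (List.mem_cons_self)) h

lemma mem_buildComposites (n : Int) (k : Nat) (hk : (k : Int) < n) :
    ((k : Int) ∈ buildComposites n) ↔ (2 ≤ k ∧ ¬ Nat.Prime k) := by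
  constructor
  · intro h
    have hw : SieveWit (k : Int) := by
      refine sieve_fold_sound n _ PySem.Set.empty ?_ (by intro y hy; cases hy) _ h
      intro p hp
      exact ((PySem.List.mem_pyRange_one).mp hp).1
    refine ⟨?_, by simpa using not_prime_of_sieveWit hw⟩
    obtain ⟨p, hp2, _, hsq⟩ := hw
    nlinarith [hsq, hp2]
  · rintro ⟨hk2, hnp⟩
    set q := k.minFac with hq
    have hqpr : Nat.Prime q := Nat.minFac_prime (by omega)
    have hqdvd : q ∣ k := Nat.minFac_dvd k
    have hqsq : q * q ≤ k := by
      have := Nat.minFac_sq_le_self (by omega) hnp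
      nlinarith [this, sq q]
    have hq2 : 2 ≤ q := hqpr.two_le
    have hqn : q * q ≤ n.toNat := by omega
    apply sieve_fold_complete n _ PySem.Set.empty (q : Int) (k : Int)
      (fun p hp => ((PySem.List.mem_pyRange_one).mp hp).1)
      (by intro y hy; cases hy)
      ?_ (by simpa using hqpr) ?_
    · rw [PySem.List.mem_pyRange_one]
      have : q ≤ Nat.sqrt n.toNat := Nat.le_sqrt.mpr hqn
      constructor <;> [exact_mod_cast hq2; exact_mod_cast Nat.lt_succ_of_le this]
    · rw [PySem.List.mem_pyRange_iff_of_pos (by exact_mod_cast Nat.lt_of_lt_of_le (by omega) hq2)]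
      refine ⟨by exact_mod_cast hqsq, hk, ?_⟩
      have : (q : Int) ∣ (k : Int) := Int.natCast_dvd_natCast.mpr hqdvd
      exact dvd_sub this (Dvd.intro q rfl)

lemma checkPastNum_eq (k : Nat) : checkPastNum (k : Int) = decide (Nat.Prime k) := by
  unfold checkPastNum
  simp only [Int.toNat_natCast]
  by_cases h2 : (k : Int) < 2
  · rw [if_pos h2]
    have : k = 0 ∨ k = 1 := by omega
    rcases this with rfl | rfl <;> simp [Nat.not_prime_zero, Nat.not_prime_one]
  · rw [if_neg h2]
    by_cases he : (k : Int) = 2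
    · have : k = 2 := by omega
      subst this
      norm_num [Nat.prime_two]
    · rw [if_neg he]
      have hk3 : 3 ≤ k := by omega
      by_cases hev : PySem.Int.mod (k : Int) 2 = 0
      · rw [if_pos hev]
        rw [PySem.Int.mod_eq_zero_iff_dvd] at hev
        have h2k : 2 ∣ k := by exact_mod_cast hev
        have : ¬ Nat.Prime k := by
          intro hp
          rcases hp.eq_one_or_self_of_dvd 2 h2k with h | h <;> omega
        simp [this]
      · rw [if_neg hev]
        rw [PySem.Int.mod_eq_zero_iff_dvd] at hev
        have hodd : ¬ (2 ∣ k) := fun h => hev (by exact_mod_cast h)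
        by_cases hp : Nat.Prime k
        · have hany : (PySem.List.pyRange 3 ((Nat.sqrt k : Int) + 1) 2).any
              (fun num => PySem.Int.mod (k : Int) num = 0) = false := by
            rw [List.any_eq_false]
            intro num hnum
            rw [PySem.List.mem_pyRange_iff_of_pos (by omega)] at hnum
            obtain ⟨h3, hlt, _⟩ := hnum
            simp only [decide_eq_true_eq, PySem.Int.mod_eq_zero_iff_dvd]
            intro hdvd
            have hnn : num.toNat ∣ k := by
              rcases hdvd with ⟨c, hc⟩
              have hc0 : 0 ≤ c := by nlinarith
              refine ⟨c.toNat, ?_⟩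
              have hkc : (k : Int) = (num.toNat : Int) * (c.toNat : Int) := by
                rw [Int.toNat_of_nonneg (by omega), Int.toNat_of_nonneg hc0]; exact hc
              exact_mod_cast hkc
            have hle : num.toNat ≤ Nat.sqrt k := by omega
            have hsk : Nat.sqrt k < k := Nat.sqrt_lt_self (by omega)
            rcases hp.eq_one_or_self_of_dvd _ hnn with h | h <;> omega
          simp [hany, hp]
        · have hq := Nat.minFac_prime (n := k) (by omega)
          have hqd := Nat.minFac_dvd k
          have hqsq : k.minFac * k.minFac ≤ k := by
            have := Nat.minFac_sq_le_self (by omega) hp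
            nlinarith [this, sq k.minFac]
          have hq2 : k.minFac ≠ 2 := fun h => hodd (h ▸ hqd)
          have hq3 : 3 ≤ k.minFac := by
            have := hq.two_le
            omega
          have hqodd : ¬ (2 ∣ k.minFac) := by
            intro h
            rcases hq.eq_one_or_self_of_dvd 2 h with h' | h' <;> omega
          have hany : (PySem.List.pyRange 3 ((Nat.sqrt k : Int) + 1) 2).any
              (fun num => PySem.Int.mod (k : Int) num = 0) = true := by
            rw [List.any_eq_true]
            refine ⟨(k.minFac : Int), ?_, ?_⟩
            · rw [PySem.List.mem_pyRange_iff_of_pos (by omega)]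
              have hle : k.minFac ≤ Nat.sqrt k := Nat.le_sqrt.mpr hqsq
              refine ⟨by exact_mod_cast hq3, by exact_mod_cast Nat.lt_succ_of_le hle, ?_⟩
              have : k.minFac % 2 = 1 := by omega
              omega
            · simp only [decide_eq_true_eq, PySem.Int.mod_eq_zero_iff_dvd]
              exact_mod_cast hqd
          simp [hany, hp]

lemma cond_eq (data : List Int) (k : Nat) (hk : k < data.length) :
    checkPastNum (k : Int) =
      (decide (2 ≤ (k : Int)) && !((buildComposites (data.length : Int)).contains (k : Int))) := by
  rw [checkPastNum_eq]
  have hmem := mem_buildComposites (data.length : Int) k (by exact_mod_cast hk)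
  by_cases hp : Nat.Prime k
  · have h2 : 2 ≤ (k : Int) := by exact_mod_cast hp.two_le
    have hnot : (k : Int) ∉ buildComposites (data.length : Int) := fun h => (hmem.mp h).2 hp
    have : (buildComposites (data.length : Int)).contains (k : Int) = false := by
      by_contra h
      exact hnot ((PySem.Set.contains_iff _ _).mp (by simpa using h))
    rw [this]
    simp [hp, h2]
  · by_cases h2 : 2 ≤ k
    · have hin : (k : Int) ∈ buildComposites (data.length : Int) := hmem.mpr ⟨h2, hp⟩
      have : (buildComposites (data.length : Int)).contains (k : Int) = true :=
        (PySem.Set.contains_iff _ _).mpr hin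
      rw [this]
      simp [hp]
    · have h2' : ¬ (2 ≤ (k : Int)) := by exact_mod_cast h2
      simp [hp, h2']

-- ===== VERDICT (by name: the statement is the Claim_ definition above) =====
theorem crypto_spec : Claim_equal_crypto := by
  intro data _
  unfold Spec_crypto crypto crypto_alt
  apply PySem.List.foldl_congr_mem
  intro acc ix hix
  rw [PySem.List.mem_enumerate_iff] at hix
  obtain ⟨k, hk, rfl⟩ := hix
  simp only [zero_add]
  rw [cond_eq data k hk]
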